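-- pv_equiv track=rewrite | github.com/iAmMortos/DndCharacterGenerator | randomizer.py | _get_short_source_text
-- ===== SOURCE A (Python) =====
-- def _get_short_source_text(srctext):
--   src_texts = []
--   sources = srctext.split('/')
--   for rsrc in sources:
--     additional = False
--     if rsrc.endswith('+'):
--       rsrc = rsrc[:-1]
--       additional = True
--     if additional:
--       rsrc = "%s [addl. vars.]" % rsrc
--     src_texts += [rsrc]
--   return ', '.join(src_texts)
-- ===== SOURCE B (Python) =====
-- def _get_short_source_text(srctext):
--   # Single pass over the characters: a '+' that ends a segment (i.e. is
--   # followed by '/' or ends the string) becomes ' [addl. vars.]', each '/'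
--   # becomes ', ', everything else is copied through.
--   out = []
--   n = len(srctext)
--   for i, c in enumerate(srctext):
--     if c == '+' and (i == n - 1 or srctext[i + 1] == '/'):
--       out.append(' [addl. vars.]')
--     elif c == '/':
--       out.append(', ')
--     else:
--       out.append(c)
--   return ''.join(out)
-- ===== Notes on version B (the rewrite author's own statement) =====
-- stated objective: alternative
-- what changed: Replaces split-on-'/' plus a per-segment loop that strips a trailing '+' and rejoins with ', ' by a single left-to-right character scan with one-character lookahead that rewrites segment-final '+' and '/' in place.
import Mathlib
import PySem

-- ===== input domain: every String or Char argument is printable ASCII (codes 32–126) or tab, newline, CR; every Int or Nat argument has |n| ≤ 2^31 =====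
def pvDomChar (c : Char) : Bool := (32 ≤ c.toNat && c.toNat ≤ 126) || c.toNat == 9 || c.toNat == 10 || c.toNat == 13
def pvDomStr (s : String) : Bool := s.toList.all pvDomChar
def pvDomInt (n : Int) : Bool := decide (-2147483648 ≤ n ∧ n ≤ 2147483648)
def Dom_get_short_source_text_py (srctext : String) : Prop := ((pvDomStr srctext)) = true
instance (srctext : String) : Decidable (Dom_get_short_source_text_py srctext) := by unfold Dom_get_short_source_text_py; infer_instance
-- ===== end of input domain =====

-- B replaces split-on-'/' + per-segment trailing-'+' handling + join by a single
-- character scan with one-char lookahead (alternative decomposition, same cost).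


-- ===== PORT A =====
-- loop body of A: strip a trailing '+' and append the suffix when it was there
def pieceA (rsrc : List Char) : List Char :=
  let additional := PySem.Chars.endswith rsrc ['+']
  let rsrc' := if additional then PySem.Chars.slice rsrc none (some (-1)) else rsrc
  if additional then rsrc' ++ (" [addl. vars.]".toList) else rsrc'

def get_short_source_text_py (srctext : String) : String :=
  let sources := PySem.Chars.splitOn srctext.toList ['/']
  let src_texts := sources.foldl (fun acc rsrc => acc ++ [pieceA rsrc]) []
  String.mk (PySem.Chars.join (", ".toList) src_texts)

-- ===== PORT B =====
-- single scan with one-character lookahead (Source B's loop over enumerate(srctext))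
def altGo : List Char → List Char
  | [] => []
  | c :: rest =>
      if c = '+' ∧ (rest = [] ∨ rest.head? = some '/') then
        (" [addl. vars.]".toList) ++ altGo rest
      else if c = '/' then (", ".toList) ++ altGo rest
      else c :: altGo rest

def get_short_source_text_py_alt (srctext : String) : String :=
  String.mk (altGo srctext.toList)

-- ===== PRECONDITION & SPEC =====
def Spec_get_short_source_text_py (srctext : String) (out : String) : Prop := out = get_short_source_text_py_alt srctext
instance (srctext : String) (out : String) : Decidable (Spec_get_short_source_text_py srctext out) := by unfold Spec_get_short_source_text_py; infer_instance

-- ===== CLAIM (what is proved, stated in full; the proofs are below) =====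
def Claim_equal_get_short_source_text_py : Prop := ∀ (srctext : String), Dom_get_short_source_text_py srctext → Spec_get_short_source_text_py srctext (get_short_source_text_py srctext)

-- ===== LEMMAS AND PROOFS =====

-- pure (fuel-free) description of srctext.split('/')
def sp : List Char → List (List Char)
  | [] => [[]]
  | c :: rest => if c = '/' then [] :: sp rest else modHead (c :: ·) (sp rest)
where
  modHead (f : List Char → List Char) : List (List Char) → List (List Char)
    | [] => []
    | p :: ps => f p :: ps

theorem sp_ne_nil (cs : List Char) : sp cs ≠ [] := by
  cases cs with
  | nil => simp [sp]
  | cons c rest =>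
    simp only [sp]
    split
    · simp
    · cases h : sp rest with
      | nil => exact absurd h (sp_ne_nil rest)
      | cons p ps => simp [sp.modHead, h]

theorem splitOn_go_spec : ∀ (fuel : Nat) (l cur : List Char) (acc : List (List Char)),
    l.length < fuel →
    PySem.Chars.splitOn.go ['/'] fuel l cur acc
      = acc.reverse ++ sp.modHead (fun p => cur.reverse ++ p) (sp l) := by
  intro fuel
  induction fuel with
  | zero => intro l cur acc h; omega
  | succ n ih =>
    intro l cur acc h
    cases l with
    | nil =>
      simp [PySem.Chars.splitOn.go, sp, sp.modHead]
    | cons c rest =>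
      by_cases hc : c = '/'
      · subst hc
        rw [PySem.Chars.splitOn.go]
        simp only [List.isPrefixOf, beq_self_eq_true, Bool.and_true, if_pos, List.length_cons,
          List.length_nil, Nat.zero_add, List.drop_succ_cons, List.drop_zero]
        rw [ih rest [] (cur.reverse :: acc) (by simpa using Nat.lt_of_succ_lt_succ h)]
        cases hsp : sp rest with
        | nil => exact absurd hsp (sp_ne_nil rest)
        | cons p ps => simp [sp, sp.modHead, hsp]
      · rw [PySem.Chars.splitOn.go]
        have hpre : (['/'].isPrefixOf (c :: rest)) = false := by
          simp [List.isPrefixOf]; exact fun h' => absurd h'.symm hc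
        rw [hpre]
        simp only [Bool.false_eq_true, if_false]
        rw [ih rest (c :: cur) acc (by simpa using Nat.lt_of_succ_lt_succ h)]
        cases hsp : sp rest with
        | nil => exact absurd hsp (sp_ne_nil rest)
        | cons p ps => simp [sp, sp.modHead, hsp, hc]

theorem splitOn_eq_sp (cs : List Char) : PySem.Chars.splitOn cs ['/'] = sp cs := by
  rw [PySem.Chars.splitOn, splitOn_go_spec (cs.length + 1) cs [] [] (by omega)]
  cases hsp : sp cs with
  | nil => exact absurd hsp (sp_ne_nil cs)
  | cons p ps => simp [sp.modHead]

-- endswith on a one-character pattern reads the last character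
theorem endswith_plus_iff (s : List Char) :
    PySem.Chars.endswith s ['+'] = true ↔ s.getLast? = some '+' := by
  rw [PySem.Chars.endswith_iff]
  constructor
  · rintro ⟨t, rfl⟩; simp [List.getLast?_concat]
  · intro h
    rcases List.eq_nil_or_concat s with rfl | ⟨t, x, rfl⟩
    · simp at h
    · simp [List.getLast?_concat] at h; subst h; exact ⟨t, by simp⟩

-- pieceA distributes over cons except when the tail piece is empty and c = '+'
theorem getLast?_cons_ne_nil (c : Char) (h : List Char) (hne : h ≠ []) :
    (c :: h).getLast? = h.getLast? := by
  cases h with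
  | nil => simp at hne
  | cons a t => simp [List.getLast?_cons_cons]

-- pieceA distributes over cons except when the tail piece is empty and c = '+'
theorem pieceA_cons (c : Char) (h : List Char) (hx : ¬(c = '+' ∧ h = [])) :
    pieceA (c :: h) = c :: pieceA h := by
  unfold pieceA
  simp only [PySem.Chars.slice_eq_listSlice, PySem.List.slice_to_neg_one]
  cases h with
  | nil =>
    have hc : c ≠ '+' := fun hcp => hx ⟨hcp, rfl⟩
    have h1 : PySem.Chars.endswith [c] ['+'] = false := by
      rw [Bool.eq_false_iff]
      intro hh
      exact hc (by simpa using (endswith_plus_iff [c]).mp hh)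
    have h2 : PySem.Chars.endswith ([] : List Char) ['+'] = false := by decide
    rw [h1, h2]; simp
  | cons a t =>
    have hne : (a :: t : List Char) ≠ [] := by simp
    have hcons : PySem.Chars.endswith (c :: a :: t) ['+'] = PySem.Chars.endswith (a :: t) ['+'] := by
      apply Bool.coe_iff_coe.mp
      rw [endswith_plus_iff, endswith_plus_iff, getLast?_cons_ne_nil c _ hne]
    rw [hcons]
    cases he : PySem.Chars.endswith (a :: t) ['+'] with
    | false => simp
    | true => simp [List.dropLast_cons_of_ne_nil hne]

theorem pieceA_plus_end : pieceA ['+'] = " [addl. vars.]".toList := by decide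

-- the head of sp rest is empty exactly when B's lookahead fires
theorem sp_head_nil_iff (rest : List Char) (p : List Char) (ps : List (List Char))
    (h : sp rest = p :: ps) : (p = [] ↔ (rest = [] ∨ rest.head? = some '/')) := by
  cases rest with
  | nil => simp [sp] at h; simp [h.1.symm]
  | cons c r =>
    by_cases hc : c = '/'
    · subst hc; simp [sp] at h; simp [h.1.symm]
    · simp only [sp, if_neg hc] at h
      cases hr : sp r with
      | nil => exact absurd hr (sp_ne_nil r)
      | cons q qs =>
        rw [hr] at h
        simp [sp.modHead] at h
        simp [← h.1, hc]

-- join of the mapped pieces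
def J (l : List (List Char)) : List Char := PySem.Chars.join (", ".toList) (l.map pieceA)

theorem J_cons_cons (a b : List Char) (l : List (List Char)) :
    J (a :: b :: l) = pieceA a ++ (", ".toList) ++ J (b :: l) := by
  simp [J, PySem.Chars.join_cons_cons]

theorem main_eq (cs : List Char) : J (sp cs) = altGo cs := by
  induction cs with
  | nil => decide
  | cons c rest ih =>
    cases hsp : sp rest with
    | nil => exact absurd hsp (sp_ne_nil rest)
    | cons p ps =>
      by_cases hc : c = '/'
      · subst hc
        rw [show sp ('/' :: rest) = [] :: p :: ps from by simp [sp, hsp]]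
        rw [J_cons_cons, ← hsp, ih]
        simp [altGo, show pieceA [] = [] from by decide]
      · have hgo : altGo (c :: rest)
            = if c = '+' ∧ (rest = [] ∨ rest.head? = some '/') then
                (" [addl. vars.]".toList) ++ altGo rest
              else c :: altGo rest := by
          simp only [altGo]
          split
          · rfl
          · simp [hc]
        by_cases hla : c = '+' ∧ (rest = [] ∨ rest.head? = some '/')
        · -- lookahead fires: the current piece is exactly ['+']
          obtain ⟨hcp, hrest⟩ := hla
          subst hcp
          have hp : p = [] := ((sp_head_nil_iff rest p ps hsp)).mpr hrest
          subst hp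
          rw [hgo, if_pos ⟨rfl, hrest⟩]
          simp only [sp, if_neg hc, hsp, sp.modHead]
          cases ps with
          | nil =>
            have h2 : altGo rest = [] := by rw [← ih, hsp]; decide
            rw [h2]; decide
          | cons q qs =>
            have h2 : altGo rest = (", ".toList) ++ J (q :: qs) := by
              rw [← ih, hsp, J_cons_cons, show pieceA [] = [] from by decide]
              simp
            rw [J_cons_cons, pieceA_plus_end, h2]
            simp
        · -- lookahead does not fire: p ≠ [] or c ≠ '+'
          rw [hgo, if_neg hla]
          have hx : ¬(c = '+' ∧ p = []) := by
            rintro ⟨hcp, hpn⟩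
            exact hla ⟨hcp, (sp_head_nil_iff rest p ps hsp).mp hpn⟩
          simp only [sp, if_neg hc, hsp, sp.modHead]
          cases ps with
          | nil =>
            simp only [J, List.map, PySem.Chars.join_singleton]
            rw [pieceA_cons c p hx]
            have h2 : altGo rest = J [p] := by rw [← ih, hsp]
            rw [h2]
            simp [J, PySem.Chars.join_singleton]
          | cons q qs =>
            have h2 : altGo rest = pieceA p ++ (", ".toList) ++ J (q :: qs) := by
              rw [← ih, hsp, J_cons_cons]
            rw [J_cons_cons, pieceA_cons c p hx, h2]
            simp

-- ===== VERDICT (by name: the statement is the Claim_ definition above) =====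
theorem get_short_source_text_py_spec : Claim_equal_get_short_source_text_py := by
  intro srctext _
  unfold Spec_get_short_source_text_py get_short_source_text_py get_short_source_text_py_alt
  simp only [splitOn_eq_sp, PySem.List.foldl_append_singleton_eq_map]
  rw [← main_eq srctext.toList]
  rfl
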